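-- pv_equiv track=rewrite | github.com/nitin12384/cf_user_list | helper/load_data.py | generate_problemset_diff_cnt
-- ===== SOURCE A (Python) =====
-- def generate_problemset_diff_cnt(problemset):
--     problemset_diff_cnt = {}
--     low, high, step = 800, 3500, 100
--     for rating_int in range(low, high+step, step):
--         rating = str(rating_int)
--         problemset_diff_cnt[rating] = 0
--
--     problem_cnt = len(problemset)
--     rating_unavailable_cnt = 0
--
--     for problem in problemset:
--         try:
--             rating = str(problem["rating"])
--             problemset_diff_cnt[rating] += 1
--         except KeyError:
--             rating_unavailable_cnt += 1
--
--     problemset_diff_cnt["total"] = problem_cnt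
--     problemset_diff_cnt["count_rating_unavailable"] = rating_unavailable_cnt
--
--     return problemset_diff_cnt
-- ===== SOURCE B (Python) =====
-- def generate_problemset_diff_cnt(problemset):
--     # pass 1: index — count occurrences of each rating string
--     counts = {}
--     for problem in problemset:
--         if "rating" in problem:
--             r = str(problem["rating"])
--             counts[r] = counts.get(r, 0) + 1
--     # pass 2: distribute counter values over the fixed rating buckets
--     result = {str(r): 0 for r in range(800, 3600, 100)}
--     matched = 0
--     for key in result:
--         c = counts.get(key, 0)
--         result[key] = c
--         matched += c
--     # pass 3: reconcile — everything not landing in a bucket counts as unavailable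
--     total = len(problemset)
--     result["total"] = total
--     result["count_rating_unavailable"] = total - matched
--     return result
-- ===== Notes on version B (the rewrite author's own statement) =====
-- stated objective: alternative
-- what changed: A fills the fixed bucket dict in one fused pass, routing both missing ratings and non-bucket ratings to the unavailable counter via caught KeyErrors; B first builds a plain counter of all rating strings in one pass, then distributes it over the seeded buckets in a second pass, and finally reconciles unavailable arithmetically as total minus matched.
import Mathlib
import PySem

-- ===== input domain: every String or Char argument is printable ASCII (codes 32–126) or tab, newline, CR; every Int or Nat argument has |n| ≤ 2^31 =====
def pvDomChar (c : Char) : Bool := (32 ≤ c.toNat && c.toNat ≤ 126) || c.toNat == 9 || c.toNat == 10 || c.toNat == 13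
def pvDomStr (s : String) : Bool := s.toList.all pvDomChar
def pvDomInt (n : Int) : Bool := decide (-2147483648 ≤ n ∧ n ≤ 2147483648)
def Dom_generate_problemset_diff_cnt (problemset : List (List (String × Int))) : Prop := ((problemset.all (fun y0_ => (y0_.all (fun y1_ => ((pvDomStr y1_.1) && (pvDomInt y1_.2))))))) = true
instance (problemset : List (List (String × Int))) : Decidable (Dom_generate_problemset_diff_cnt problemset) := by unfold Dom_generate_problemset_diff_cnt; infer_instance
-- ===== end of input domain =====

-- B replaces A's fused bucket-filling pass by counter-index + distribute + reconcile passes: an alternative decomposition, same cost.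


-- ===== PORT A =====
-- the seeded bucket dict {str(r): 0 for r in range(800, 3500+100, 100)}
def pdcSeedA : PySem.Dict String Int :=
  (PySem.List.pyRange 800 (3500 + 100) 100).foldl
    (fun d r => d.insert (PySem.Int.toStr r) 0) PySem.Dict.empty

-- body of A's loop: try str(problem["rating"]); bucket[rating] += 1; except KeyError: unavailable += 1
def pdcStepA (st : PySem.Dict String Int × Int) (problem : List (String × Int)) :
    PySem.Dict String Int × Int :=
  match (PySem.Dict.mk problem).get? "rating" with
  | none => (st.1, st.2 + 1)
  | some v =>
    let rating := PySem.Int.toStr v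
    match st.1.get? rating with
    | none => (st.1, st.2 + 1)
    | some c => (st.1.insert rating (c + 1), st.2)

def generate_problemset_diff_cnt (problemset : List (List (String × Int))) : List (String × Int) :=
  let problem_cnt : Int := PySem.List.len problemset
  let st := problemset.foldl pdcStepA (pdcSeedA, 0)
  (((st.1.insert "total" problem_cnt).insert "count_rating_unavailable" st.2)).items

-- ===== PORT B =====
-- pass 1 body: if "rating" in problem: counts[str(problem["rating"])] = counts.get(..., 0) + 1
def pdcStepB (counts : PySem.Dict String Int) (problem : List (String × Int)) :
    PySem.Dict String Int :=
  let p := PySem.Dict.mk problem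
  if p.contains "rating" then
    let r := PySem.Int.toStr (p.getD "rating" 0)
    counts.insert r (counts.getD r 0 + 1)
  else
    counts

-- the seeded bucket dict {str(r): 0 for r in range(800, 3600, 100)}
def pdcSeedB : PySem.Dict String Int :=
  (PySem.List.pyRange 800 3600 100).foldl
    (fun d r => d.insert (PySem.Int.toStr r) 0) PySem.Dict.empty

-- pass 2 body: c = counts.get(key, 0); result[key] = c; matched += c
def pdcDistribute (counts : PySem.Dict String Int) (acc : PySem.Dict String Int × Int)
    (k : String) : PySem.Dict String Int × Int :=
  let c := counts.getD k 0
  (acc.1.insert k c, acc.2 + c)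

def generate_problemset_diff_cnt_alt (problemset : List (List (String × Int))) : List (String × Int) :=
  let counts := problemset.foldl pdcStepB PySem.Dict.empty
  let result0 := pdcSeedB
  let st2 := result0.keys.foldl (pdcDistribute counts) (result0, 0)
  let total : Int := PySem.List.len problemset
  (((st2.1.insert "total" total).insert "count_rating_unavailable" (total - st2.2))).items

-- ===== PRECONDITION & SPEC =====
def Spec_generate_problemset_diff_cnt (problemset : List (List (String × Int))) (out : List (String × Int)) : Prop := out = generate_problemset_diff_cnt_alt problemset
instance (problemset : List (List (String × Int))) (out : List (String × Int)) : Decidable (Spec_generate_problemset_diff_cnt problemset out) := by unfold Spec_generate_problemset_diff_cnt; infer_instance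

-- ===== CLAIM (what is proved, stated in full; the proofs are below) =====
def Claim_equal_generate_problemset_diff_cnt : Prop := ∀ (problemset : List (List (String × Int))), Dom_generate_problemset_diff_cnt problemset → Spec_generate_problemset_diff_cnt problemset (generate_problemset_diff_cnt problemset)

-- ===== LEMMAS AND PROOFS =====

-- the rating of a problem, as the string A and B both compute, if present
def pdcRating (problem : List (String × Int)) : Option String :=
  ((PySem.Dict.mk problem).get? "rating").map PySem.Int.toStr

-- the bucket keys, as a literal list
def pdcKeys : List String :=
  ["800","900","1000","1100","1200","1300","1400","1500","1600","1700","1800","1900",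
   "2000","2100","2200","2300","2400","2500","2600","2700","2800","2900","3000","3100",
   "3200","3300","3400","3500"]

-- a problem A sends to the unavailable counter: no rating, or a rating outside the buckets
def pdcBad (problem : List (String × Int)) : Bool :=
  match pdcRating problem with
  | none => true
  | some s => !(pdcKeys.contains s)

-- counts getD of a constant-zero literal dict
lemma pdc_getD_zero (ks : List String) (k : String) :
    (PySem.Dict.mk (ks.map (fun k => (k, (0:Int))))).getD k 0 = 0 := by
  induction ks with
  | nil => simp [PySem.Dict.getD, PySem.Dict.get?]
  | cons a t ih =>
    simp only [List.map_cons, PySem.Dict.getD_eq_get?_getD, PySem.Dict.get?_mk_cons]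
    by_cases h : a == k <;> simp [h] <;>
      simpa [PySem.Dict.getD_eq_get?_getD] using ih

-- A's loop invariant
lemma pdc_foldA_inv (xs : List (List (String × Int))) (d : PySem.Dict String Int) (u : Int)
    (hk : d.keys = pdcKeys) :
    (xs.foldl pdcStepA (d, u)).1.keys = pdcKeys ∧
    (∀ k ∈ pdcKeys, (xs.foldl pdcStepA (d, u)).1.getD k 0
        = d.getD k 0 + (xs.countP (fun p => pdcRating p == some k) : Int)) ∧
    (xs.foldl pdcStepA (d, u)).2 = u + (xs.countP pdcBad : Int) := by
  induction xs generalizing d u with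
  | nil => simp [hk]
  | cons p t ih =>
    have hnd : d.keys.Nodup := by rw [hk]; decide
    simp only [List.foldl_cons]
    rcases hr : (PySem.Dict.mk p).get? "rating" with _ | v
    · have hbad : pdcBad p = true := by simp [pdcBad, pdcRating, hr]
      have hstep : pdcStepA (d, u) p = (d, u + 1) := by simp [pdcStepA, hr]
      rw [hstep]
      obtain ⟨h1, h2, h3⟩ := ih d (u+1) hk
      refine ⟨h1, ?_, ?_⟩
      · intro k hkk
        rw [h2 k hkk]
        simp [pdcRating, hr, List.countP_cons, hbad]
      · rw [h3]; simp [List.countP_cons, hbad]; push_cast; ring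
    · have hrat : pdcRating p = some (PySem.Int.toStr v) := by simp [pdcRating, hr]
      generalize hrdef : PySem.Int.toStr v = r at *
      by_cases hmem : r ∈ pdcKeys
      · have hc : d.get? r = some (d.getD r 0) := by
          have : d.contains r = true := by
            rw [PySem.Dict.contains_iff_mem_keys, hk]; exact hmem
          rcases hg : d.get? r with _ | c
          · rw [PySem.Dict.contains_eq_isSome_get?, hg] at this; simp at this
          · rw [PySem.Dict.getD_eq_get?_getD, hg]; rfl
        have hstep : pdcStepA (d, u) p = (d.insert r (d.getD r 0 + 1), u) := by
          simp [pdcStepA, hr, hrdef, hc]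
        rw [hstep]
        have hk' : (d.insert r (d.getD r 0 + 1)).keys = pdcKeys := by
          rw [PySem.Dict.keys_insert_of_contains _ _ (by rw [PySem.Dict.contains_iff_mem_keys, hk]; exact hmem), hk]
        obtain ⟨h1, h2, h3⟩ := ih _ u hk'
        have hbad : pdcBad p = false := by simp [pdcBad, hrat, hmem]
        refine ⟨h1, ?_, ?_⟩
        · intro k hkk
          rw [h2 k hkk, PySem.Dict.getD_insert]
          by_cases hek : k = r
          · subst hek; simp [hrat, List.countP_cons]; push_cast; ring
          · have : (pdcRating p == some k) = false := by
              simp [hrat]; exact fun h => hek h.symm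
            simp [hek, List.countP_cons, this]
        · rw [h3]; simp [List.countP_cons, hbad]
      · have hc : d.get? r = none := by
          rw [PySem.Dict.get?_eq_none_iff_not_mem_keys, hk]; exact hmem
        have hstep : pdcStepA (d, u) p = (d, u + 1) := by simp [pdcStepA, hr, hrdef, hc]
        rw [hstep]
        obtain ⟨h1, h2, h3⟩ := ih d (u+1) hk
        have hbad : pdcBad p = true := by simp [pdcBad, hrat, hmem]
        refine ⟨h1, ?_, ?_⟩
        · intro k hkk
          rw [h2 k hkk]
          have : (pdcRating p == some k) = false := by
            simp [hrat]; rintro rfl; exact hmem hkk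
          simp [List.countP_cons, this]
        · rw [h3]; simp [List.countP_cons, hbad]; push_cast; ring

-- B's pass-1 invariant
lemma pdc_foldB_inv (xs : List (List (String × Int))) (c : PySem.Dict String Int) (k : String) :
    (xs.foldl pdcStepB c).getD k 0
      = c.getD k 0 + (xs.countP (fun p => pdcRating p == some k) : Int) := by
  induction xs generalizing c with
  | nil => simp
  | cons p t ih =>
    simp only [List.foldl_cons]
    rcases hr : (PySem.Dict.mk p).get? "rating" with _ | v
    · have hco : (PySem.Dict.mk p).contains "rating" = false := by
        rw [PySem.Dict.contains_eq_isSome_get?, hr]; rfl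
      have hstep : pdcStepB c p = c := by simp [pdcStepB, hco]
      rw [hstep, ih]
      have : (pdcRating p == some k) = false := by simp [pdcRating, hr]
      simp [List.countP_cons, this]
    · have hco : (PySem.Dict.mk p).contains "rating" = true := by
        rw [PySem.Dict.contains_eq_isSome_get?, hr]; rfl
      have hgd : (PySem.Dict.mk p).getD "rating" 0 = v := by
        rw [PySem.Dict.getD_eq_get?_getD, hr]; rfl
      have hrat : pdcRating p = some (PySem.Int.toStr v) := by simp [pdcRating, hr]
      generalize hrdef : PySem.Int.toStr v = r at *
      have hstep : pdcStepB c p = c.insert r (c.getD r 0 + 1) := by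
        simp [pdcStepB, hco, hgd, hrdef]
      rw [hstep, ih, PySem.Dict.getD_insert]
      by_cases hek : k = r
      · subst hek; simp [hrat, List.countP_cons]; push_cast; ring
      · have : (pdcRating p == some k) = false := by
          simp [hrat]; exact fun h => hek h.symm
        simp [hek, List.countP_cons, this]

-- B's distribute invariant
lemma pdc_distr_inv (counts : PySem.Dict String Int) (ks : List String)
    (d : PySem.Dict String Int) (s : Int)
    (hsub : ∀ k ∈ ks, d.contains k = true) (hnd : ks.Nodup) :
    (ks.foldl (pdcDistribute counts) (d, s)).1.keys = d.keys ∧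
    (∀ k, (ks.foldl (pdcDistribute counts) (d, s)).1.getD k 0
        = if k ∈ ks then counts.getD k 0 else d.getD k 0) ∧
    (ks.foldl (pdcDistribute counts) (d, s)).2
        = s + (ks.map (fun k => counts.getD k 0)).sum := by
  induction ks generalizing d s with
  | nil => simp
  | cons a t ih =>
    simp only [List.foldl_cons]
    have hca : d.contains a = true := hsub a (by simp)
    have hstep : pdcDistribute counts (d, s) a
        = (d.insert a (counts.getD a 0), s + counts.getD a 0) := rfl
    rw [hstep]
    have hsub' : ∀ k ∈ t, (d.insert a (counts.getD a 0)).contains k = true := by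
      intro k hkt
      rw [PySem.Dict.contains_insert, hsub k (by simp [hkt])]; simp
    obtain ⟨h1, h2, h3⟩ := ih (d.insert a (counts.getD a 0)) (s + counts.getD a 0) hsub' hnd.of_cons
    refine ⟨?_, ?_, ?_⟩
    · rw [h1, PySem.Dict.keys_insert_of_contains _ _ hca]
    · intro k
      rw [h2 k, PySem.Dict.getD_insert]
      by_cases hkt : k ∈ t
      · simp [hkt]
      · by_cases hka : k = a
        · subst hka; simp [hkt]
        · simp [hkt, hka]
    · rw [h3]; simp; ring

-- per-element: the 0/1 indicator sum over the buckets
lemma pdc_indicator (p : List (String × Int)) :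
    (pdcKeys.map (fun k => if pdcRating p == some k then (1:Int) else 0)).sum
      = if pdcBad p then 0 else 1 := by
  rcases hr : pdcRating p with _ | s
  · simp [pdcBad, hr]
  · have h1 : pdcKeys.map (fun k => if some s == some k then (1:Int) else 0)
        = pdcKeys.map (fun k => if (k == s) then (1:Int) else 0) := by
      apply List.map_congr_left; intro k _
      by_cases h : k = s <;> simp [h]; exact fun hh => h hh.symm
    rw [h1, PySem.List.sum_map_ite_one_zero]
    have h2 : List.countP (fun k => k == s) pdcKeys = pdcKeys.count s := rfl
    rw [h2]
    by_cases hm : s ∈ pdcKeys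
    · rw [List.count_eq_one_of_mem (by decide) hm]; simp [pdcBad, hr, hm]
    · rw [List.count_eq_zero_of_not_mem hm]; simp [pdcBad, hr, hm]

-- counting split: bucketed + bad = total
lemma pdc_count_split (xs : List (List (String × Int))) :
    (pdcKeys.map (fun k => ((xs.countP (fun p => pdcRating p == some k)) : Int))).sum
      + (xs.countP pdcBad : Int) = (xs.length : Int) := by
  induction xs with
  | nil => simp
  | cons p t ih =>
    have hmap : pdcKeys.map (fun k => ((List.countP (fun q => pdcRating q == some k) (p :: t)) : Int))
        = pdcKeys.map (fun k =>
            ((List.countP (fun q => pdcRating q == some k) t) : Int)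
          + (if pdcRating p == some k then (1:Int) else 0)) := by
      apply List.map_congr_left
      intro k _
      rw [List.countP_cons]
      by_cases h : (pdcRating p == some k) = true <;> simp [h]
    rw [hmap, PySem.List.sum_map_add_int, pdc_indicator]
    rw [List.countP_cons]
    by_cases hb : pdcBad p = true <;> simp [hb] <;> push_cast <;> omega

-- appends a dict with keys pdcKeys gets from the two trailing inserts
lemma pdc_tail (d : PySem.Dict String Int) (hk : d.keys = pdcKeys) (a b : Int) :
    ((d.insert "total" a).insert "count_rating_unavailable" b).items
      = pdcKeys.map (fun k => (k, d.getD k 0)) ++ [("total", a), ("count_rating_unavailable", b)] := by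
  have h1 : d.contains "total" = false := by
    rw [PySem.Dict.contains_eq_decide_mem_keys, hk]; decide
  have h2 : (d.insert "total" a).contains "count_rating_unavailable" = false := by
    rw [PySem.Dict.contains_eq_decide_mem_keys,
        PySem.Dict.keys_insert_of_not_contains _ _ h1, hk]; decide
  rw [PySem.Dict.items_insert_of_not_contains _ _ h2,
      PySem.Dict.items_insert_of_not_contains _ _ h1,
      PySem.Dict.items_eq_map_keys d (by rw [hk]; decide) 0, hk]
  simp

theorem pdc_main (problemset : List (List (String × Int))) :
    generate_problemset_diff_cnt problemset = generate_problemset_diff_cnt_alt problemset := by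
  unfold generate_problemset_diff_cnt generate_problemset_diff_cnt_alt
  simp only []
  obtain ⟨hA1, hA2, hA3⟩ :=
    pdc_foldA_inv problemset pdcSeedA 0 (by decide)
  have hsubB : ∀ k ∈ pdcSeedB.keys, pdcSeedB.contains k = true := by decide
  obtain ⟨hB1, hB2, hB3⟩ :=
    pdc_distr_inv (problemset.foldl pdcStepB PySem.Dict.empty) pdcSeedB.keys pdcSeedB 0
      hsubB (by decide)
  have hkeysB : pdcSeedB.keys = pdcKeys := by decide
  rw [pdc_tail _ hA1, pdc_tail _ (by rw [hB1, hkeysB])]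
  have hcnt : ∀ k, (problemset.foldl pdcStepB PySem.Dict.empty).getD k 0
      = (problemset.countP (fun p => pdcRating p == some k) : Int) := by
    intro k
    rw [pdc_foldB_inv, PySem.Dict.getD_empty]; ring
  have hmap : pdcKeys.map (fun k => (k, (problemset.foldl pdcStepA (pdcSeedA, 0)).1.getD k 0))
      = pdcKeys.map (fun k =>
          (k, ((pdcSeedB.keys.foldl (pdcDistribute (problemset.foldl pdcStepB PySem.Dict.empty)) (pdcSeedB, 0)).1.getD k 0))) := by
    apply List.map_congr_left
    intro k hkk
    have hz : pdcSeedA.getD k 0 = 0 := by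
      have he : pdcSeedA = PySem.Dict.mk (pdcKeys.map (fun k => (k, (0:Int)))) := by decide
      rw [he, pdc_getD_zero]
    rw [hA2 k hkk, hB2 k, hkeysB, if_pos hkk, hcnt k, hz, zero_add]
  rw [hmap]
  have hs : (pdcKeys.map (fun k => (problemset.foldl pdcStepB PySem.Dict.empty).getD k 0)).sum
      = (pdcKeys.map (fun k => ((problemset.countP (fun p => pdcRating p == some k)) : Int))).sum := by
    apply congrArg; apply List.map_congr_left; intro k _; exact hcnt k
  have hsplit := pdc_count_split problemset
  have hval : (0:Int) + (problemset.countP pdcBad : Int)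
      = (PySem.List.len problemset)
        - ((0:Int) + (pdcKeys.map (fun k => (problemset.foldl pdcStepB PySem.Dict.empty).getD k 0)).sum) := by
    rw [hs]; simp only [PySem.List.len_eq]; omega
  rw [hA3, hB3, hkeysB, hval]

-- ===== VERDICT (by name: the statement is the Claim_ definition above) =====
theorem generate_problemset_diff_cnt_spec : Claim_equal_generate_problemset_diff_cnt := by
  intro problemset _
  unfold Spec_generate_problemset_diff_cnt
  exact pdc_main problemset
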